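-- pv_equiv track=rewrite | github.com/poutine-dejeuner/discretediffgeo | discretediffgeo/discretediffgeo.py | MakeComplex
-- ===== SOURCE A (Python) =====
-- from itertools import combinations
--
-- def MakeComplex(simplices):
--     faceset = set()
--     for simplex in simplices:
--         numnodes = len(simplex)
--         for r in range(numnodes, 0, -1):
--             for face in combinations(simplex, r):
--                     faceset.add(tuple(face))
--     return tuple(sorted(faceset))
-- ===== SOURCE B (Python) =====
-- def MakeComplex(simplices):
--     faceset = set()
--     for simplex in simplices:
--         nodes = list(simplex)
--         n = len(nodes)
--         for mask in range(1, 1 << n):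
--             face = tuple(nodes[i] for i in range(n) if mask & (1 << i))
--             faceset.add(face)
--     return tuple(sorted(faceset))
-- ===== Notes on version B (the rewrite author's own statement) =====
-- stated objective: alternative
-- what changed: Replaces the two nested loops over face sizes and itertools.combinations with a single flat bitmask enumeration of each simplex's non-empty subsets.
import Mathlib
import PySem

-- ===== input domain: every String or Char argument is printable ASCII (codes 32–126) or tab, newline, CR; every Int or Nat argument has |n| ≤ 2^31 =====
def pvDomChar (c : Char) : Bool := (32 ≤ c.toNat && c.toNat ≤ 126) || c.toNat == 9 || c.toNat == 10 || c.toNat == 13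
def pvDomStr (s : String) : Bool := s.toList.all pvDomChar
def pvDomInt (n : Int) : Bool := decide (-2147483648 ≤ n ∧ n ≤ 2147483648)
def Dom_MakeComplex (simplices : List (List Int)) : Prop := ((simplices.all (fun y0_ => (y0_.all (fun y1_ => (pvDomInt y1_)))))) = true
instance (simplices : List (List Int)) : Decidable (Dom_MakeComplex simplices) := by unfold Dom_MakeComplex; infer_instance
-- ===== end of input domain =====

-- B replaces the nested loops over face sizes and combinations by one flat bitmask
-- enumeration of each simplex's non-empty subsets (alternative decomposition, same cost).

-- ===== PORT A =====
def MakeComplex (simplices : List (List Int)) : List (List Int) :=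
  let faceset : PySem.Set (List Int) :=
    simplices.foldl (fun fs simplex =>
      (PySem.List.pyRange (simplex.length : Int) 0 (-1)).foldl (fun fs r =>
        (PySem.List.combinations simplex r.toNat).foldl (fun fs face =>
          PySem.Set.add fs face) fs) fs) PySem.Set.empty
  PySem.List.sorted faceset (fun x => x) false

-- ===== PORT B =====
-- face = tuple(nodes[i] for i in range(n) if mask & (1 << i))
def pvFace (nodes : List Int) (mask : Nat) : List Int :=
  ((List.range nodes.length).filter (fun i => mask.testBit i)).map (fun i => nodes.getD i 0)

def MakeComplex_alt (simplices : List (List Int)) : List (List Int) :=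
  let faceset : PySem.Set (List Int) :=
    simplices.foldl (fun fs nodes =>
      (List.range' 1 (2 ^ nodes.length - 1)).foldl (fun fs mask =>
        PySem.Set.add fs (pvFace nodes mask)) fs) PySem.Set.empty
  PySem.List.sorted faceset (fun x => x) false

-- ===== PRECONDITION & SPEC =====
def Spec_MakeComplex (simplices : List (List Int)) (out : List (List Int)) : Prop := out = MakeComplex_alt simplices
instance (simplices : List (List Int)) (out : List (List Int)) : Decidable (Spec_MakeComplex simplices out) := by unfold Spec_MakeComplex; infer_instance

-- ===== CLAIM (what is proved, stated in full; the proofs are below) =====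
def Claim_equal_MakeComplex : Prop := ∀ (simplices : List (List Int)), Dom_MakeComplex simplices → Spec_MakeComplex simplices (MakeComplex simplices)

-- ===== LEMMAS AND PROOFS =====

-- A fold that only ever adds elements to a PySem.Set: membership afterwards.
theorem mem_foldl_setAdd {α β : Type} [BEq α] [LawfulBEq α] (f : β → α) :
    ∀ (ms : List β) (s : PySem.Set α) (x : α),
      (x ∈ ms.foldl (fun s m => PySem.Set.add s (f m)) s ↔ x ∈ s ∨ ∃ m ∈ ms, f m = x) := by
  intro ms
  induction ms with
  | nil => intro s x; simp
  | cons m ms ih =>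
    intro s x
    simp only [List.foldl_cons, ih, PySem.Set.mem_add, List.mem_cons]
    constructor
    · rintro ((h | h) | ⟨m', hm', h⟩)
      · exact Or.inl h
      · exact Or.inr ⟨m, Or.inl rfl, h.symm⟩
      · exact Or.inr ⟨m', Or.inr hm', h⟩
    · rintro (h | ⟨m', (rfl | hm'), h⟩)
      · exact Or.inl (Or.inl h)
      · exact Or.inl (Or.inr h.symm)
      · exact Or.inr ⟨m', hm', h⟩

theorem nodup_foldl_setAdd {α β : Type} [BEq α] [LawfulBEq α] (f : β → α) :
    ∀ (ms : List β) (s : PySem.Set α), s.Nodup →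
      (ms.foldl (fun s m => PySem.Set.add s (f m)) s).Nodup := by
  intro ms
  induction ms with
  | nil => intro s hs; simpa using hs
  | cons m ms ih => intro s hs; exact ih _ (PySem.Set.nodup_add _ _ hs)

-- nested fold over simplices for port A: membership characterization
theorem mem_setA (simplices : List (List Int)) (s : PySem.Set (List Int)) (x : List Int) :
    x ∈ simplices.foldl (fun fs simplex =>
        (PySem.List.pyRange (simplex.length : Int) 0 (-1)).foldl (fun fs r =>
          (PySem.List.combinations simplex r.toNat).foldl (fun fs face =>
            PySem.Set.add fs face) fs) fs) s
    ↔ x ∈ s ∨ ∃ simplex ∈ simplices, x.Sublist simplex ∧ x ≠ [] := by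
  induction simplices generalizing s with
  | nil => simp
  | cons simplex rest ih =>
    simp only [List.foldl_cons, ih, List.mem_cons]
    have hmid : ∀ (rs : List Int) (fs : PySem.Set (List Int)),
        x ∈ rs.foldl (fun fs r =>
            (PySem.List.combinations simplex r.toNat).foldl (fun fs face =>
              PySem.Set.add fs face) fs) fs
        ↔ x ∈ fs ∨ ∃ r ∈ rs, x ∈ PySem.List.combinations simplex r.toNat := by
      intro rs
      induction rs with
      | nil => intro fs; simp
      | cons r rs ihr =>
        intro fs
        simp only [List.foldl_cons, ihr, mem_foldl_setAdd (fun face => face), List.mem_cons]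
        constructor
        · rintro ((h | ⟨c, hc, rfl⟩) | ⟨r', hr', h⟩)
          · exact Or.inl h
          · exact Or.inr ⟨r, Or.inl rfl, hc⟩
          · exact Or.inr ⟨r', Or.inr hr', h⟩
        · rintro (h | ⟨r', (rfl | hr'), h⟩)
          · exact Or.inl (Or.inl h)
          · exact Or.inl (Or.inr ⟨x, h, rfl⟩)
          · exact Or.inr ⟨r', hr', h⟩
    rw [hmid]
    constructor
    · rintro ((h | ⟨r, hr, hc⟩) | ⟨sp, hsp, hx⟩)
      · exact Or.inl h
      · rw [PySem.List.mem_pyRange_neg_one] at hr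
        rw [PySem.List.mem_combinations_iff] at hc
        refine Or.inr ⟨simplex, Or.inl rfl, hc.1, ?_⟩
        intro hnil
        have hlen := hc.2
        rw [hnil] at hlen
        simp at hlen
        omega
      · exact Or.inr ⟨sp, Or.inr hsp, hx⟩
    · rintro (h | ⟨sp, (rfl | hsp), hsub, hne⟩)
      · exact Or.inl (Or.inl h)
      · refine Or.inl (Or.inr ⟨(x.length : Int), ?_, ?_⟩)
        · rw [PySem.List.mem_pyRange_neg_one]
          have hlen := hsub.length_le
          have hpos : 0 < x.length := List.length_pos_iff.mpr hne
          omega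
        · rw [PySem.List.mem_combinations_iff]
          exact ⟨hsub, by simp⟩
      · exact Or.inr ⟨sp, hsp, hsub, hne⟩

-- pvFace structural lemma
theorem pvFace_cons (a : Int) (t : List Int) (m : Nat) :
    pvFace (a :: t) m = (if m.testBit 0 then [a] else []) ++ pvFace t (m / 2) := by
  unfold pvFace
  rw [List.length_cons, List.range_succ_eq_map]
  by_cases h : m.testBit 0 <;>
    simp [h, List.filter_map, List.map_map, Function.comp_def, Nat.testBit_add_one,
      Nat.succ_eq_add_one]

theorem pvFace_zero (nodes : List Int) : pvFace nodes 0 = [] := by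
  induction nodes with
  | nil => rfl
  | cons a t ih => rw [pvFace_cons]; simpa using ih

theorem pvFace_sublist (nodes : List Int) (m : Nat) : (pvFace nodes m).Sublist nodes := by
  induction nodes generalizing m with
  | nil => simp [pvFace]
  | cons a t ih =>
    rw [pvFace_cons]
    by_cases h : m.testBit 0
    · simpa [h] using (ih (m / 2)).cons₂ a
    · simpa [h] using (ih (m / 2)).cons a

theorem pvFace_ne_nil (nodes : List Int) (m : Nat) (h1 : 1 ≤ m) (h2 : m < 2 ^ nodes.length) :
    pvFace nodes m ≠ [] := by
  induction nodes generalizing m with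
  | nil => simp at h2; omega
  | cons a t ih =>
    rw [pvFace_cons]
    by_cases h : m.testBit 0
    · simp [h]
    · simp only [h, List.nil_append, Bool.false_eq_true, if_false]
      have hmod : m % 2 = 0 := by
        rw [Nat.testBit_zero] at h
        simp at h
        omega
      refine ih (m / 2) (by omega) ?_
      have : m < 2 ^ (t.length + 1) := by simpa [List.length_cons] using h2
      omega

theorem exists_mask_of_sublist (x nodes : List Int) (h : x.Sublist nodes) :
    ∃ m, m < 2 ^ nodes.length ∧ pvFace nodes m = x ∧ (x ≠ [] → 1 ≤ m) := by
  induction h with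
  | slnil => exact ⟨0, by simp, by simp [pvFace_zero], by simp⟩
  | @cons l₁ l₂ a _ ih =>
    obtain ⟨m, hm, hface, hpos⟩ := ih
    refine ⟨2 * m, ?_, ?_, ?_⟩
    · rw [List.length_cons]; omega
    · rw [pvFace_cons, show 2 * m / 2 = m by omega]
      have hb : (2 * m).testBit 0 = false := by
        simp [Nat.testBit_zero]; try omega
      rw [hb]
      simpa using hface
    · intro hne; have := hpos hne; omega
  | @cons₂ l₁ l₂ a _ ih =>
    obtain ⟨m, hm, hface, _⟩ := ih
    refine ⟨2 * m + 1, ?_, ?_, ?_⟩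
    · rw [List.length_cons]; omega
    · rw [pvFace_cons, show (2 * m + 1) / 2 = m by omega]
      have hb : (2 * m + 1).testBit 0 = true := by
        simp [Nat.testBit_zero]; try omega
      rw [hb]
      simpa using hface
    · omega

theorem mem_setB (simplices : List (List Int)) (s : PySem.Set (List Int)) (x : List Int) :
    x ∈ simplices.foldl (fun fs nodes =>
        (List.range' 1 (2 ^ nodes.length - 1)).foldl (fun fs mask =>
          PySem.Set.add fs (pvFace nodes mask)) fs) s
    ↔ x ∈ s ∨ ∃ nodes ∈ simplices, x.Sublist nodes ∧ x ≠ [] := by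
  induction simplices generalizing s with
  | nil => simp
  | cons nodes rest ih =>
    simp only [List.foldl_cons, ih, List.mem_cons]
    rw [mem_foldl_setAdd (fun mask => pvFace nodes mask)]
    constructor
    · rintro ((h | ⟨m, hm, rfl⟩) | ⟨sp, hsp, hx⟩)
      · exact Or.inl h
      · rw [List.mem_range'_1] at hm
        have h2 : (1:Nat) ≤ 2 ^ nodes.length := Nat.one_le_two_pow
        refine Or.inr ⟨nodes, Or.inl rfl, pvFace_sublist nodes m,
          pvFace_ne_nil nodes m hm.1 (by omega)⟩
      · exact Or.inr ⟨sp, Or.inr hsp, hx⟩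
    · rintro (h | ⟨sp, (rfl | hsp), hsub, hne⟩)
      · exact Or.inl (Or.inl h)
      · obtain ⟨m, hm, hface, hpos⟩ := exists_mask_of_sublist x sp hsub
        refine Or.inl (Or.inr ⟨m, ?_, hface⟩)
        rw [List.mem_range'_1]
        have h2 : (1:Nat) ≤ 2 ^ sp.length := Nat.one_le_two_pow
        exact ⟨hpos hne, by omega⟩
      · exact Or.inr ⟨sp, hsp, hsub, hne⟩

-- sorted with the identity key over a permutation, at the default List LT instance
theorem sorted_id_congr_perm (xs ys : List (List Int)) (h : xs.Perm ys) :
    PySem.List.sorted xs (fun x => x) false = PySem.List.sorted ys (fun x => x) false := by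
  have h2 := PySem.List.sorted_eq_sorted_of_perm (κ := List Int) xs ys (fun a => a)
    (fun a b h => h) h
  convert h2 using 2

-- ===== VERDICT (by name: the statement is the Claim_ definition above) =====
theorem MakeComplex_spec : Claim_equal_MakeComplex := by
  unfold Claim_equal_MakeComplex
  intro simplices _
  unfold Spec_MakeComplex MakeComplex MakeComplex_alt
  apply sorted_id_congr_perm
  have hA : (simplices.foldl (fun fs simplex =>
      (PySem.List.pyRange (simplex.length : Int) 0 (-1)).foldl (fun fs r =>
        (PySem.List.combinations simplex r.toNat).foldl (fun fs face =>
          PySem.Set.add fs face) fs) fs) PySem.Set.empty).Nodup := by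
    have : ∀ (sps : List (List Int)) (s : PySem.Set (List Int)), s.Nodup →
        (sps.foldl (fun fs simplex =>
          (PySem.List.pyRange (simplex.length : Int) 0 (-1)).foldl (fun fs r =>
            (PySem.List.combinations simplex r.toNat).foldl (fun fs face =>
              PySem.Set.add fs face) fs) fs) s).Nodup := by
      intro sps
      induction sps with
      | nil => intro s hs; exact hs
      | cons sp rest ih =>
        intro s hs
        refine ih _ ?_
        have hmid : ∀ (rs : List Int) (fs : PySem.Set (List Int)), fs.Nodup →
            (rs.foldl (fun fs r =>
              (PySem.List.combinations sp r.toNat).foldl (fun fs face =>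
                PySem.Set.add fs face) fs) fs).Nodup := by
          intro rs
          induction rs with
          | nil => intro fs h; exact h
          | cons r rs ihr =>
            intro fs h
            exact ihr _ (nodup_foldl_setAdd (fun face => face) _ _ h)
        exact hmid _ _ hs
    exact this simplices PySem.Set.empty (by simp [PySem.Set.empty])
  have hB : (simplices.foldl (fun fs nodes =>
      (List.range' 1 (2 ^ nodes.length - 1)).foldl (fun fs mask =>
        PySem.Set.add fs (pvFace nodes mask)) fs) PySem.Set.empty).Nodup := by
    have : ∀ (sps : List (List Int)) (s : PySem.Set (List Int)), s.Nodup →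
        (sps.foldl (fun fs nodes =>
          (List.range' 1 (2 ^ nodes.length - 1)).foldl (fun fs mask =>
            PySem.Set.add fs (pvFace nodes mask)) fs) s).Nodup := by
      intro sps
      induction sps with
      | nil => intro s hs; exact hs
      | cons sp rest ih =>
        intro s hs
        exact ih _ (nodup_foldl_setAdd (fun mask => pvFace sp mask) _ _ hs)
    exact this simplices PySem.Set.empty (by simp [PySem.Set.empty])
  rw [List.perm_ext_iff_of_nodup hA hB]
  intro x
  rw [mem_setA, mem_setB]
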